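-- pv_equiv track=rewrite | github.com/MichaelTroelsen/SIDM2conv | sidm2/galway_table_extractor.py | _group_nearby_blocks
-- ===== SOURCE A (Python) =====
-- from typing import Dict, List, Tuple, Optional, Any
--
-- def _group_nearby_blocks(blocks: List[Dict], threshold: int = 16) -> List[List[Dict]]:
--     """Group blocks that are within threshold distance."""
--     if not blocks:
--         return []
--
--     sorted_blocks = sorted(blocks, key=lambda b: b['start'])
--     groups = []
--     current_group = [sorted_blocks[0]]
--
--     for block in sorted_blocks[1:]:
--         if block['start'] - current_group[-1]['end'] <= threshold:
--             current_group.append(block)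
--         else:
--             groups.append(current_group)
--             current_group = [block]
--
--     groups.append(current_group)
--     return groups
-- ===== SOURCE B (Python) =====
-- def _group_nearby_blocks(blocks, threshold=16):
--     """Group blocks that are within threshold distance (slice-off-a-chain decomposition)."""
--     sorted_blocks = sorted(blocks, key=lambda b: b['start'])
--
--     def chain_len(prev, rest):
--         # how many further blocks chain onto `prev` (each within threshold of its predecessor)
--         n = 0
--         for b in rest:
--             if b['start'] - prev['end'] > threshold:
--                 break
--             prev = b
--             n += 1
--         return n
--
--     groups = []
--     i = 0
--     while i < len(sorted_blocks):
--         k = chain_len(sorted_blocks[i], sorted_blocks[i + 1:])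
--         groups.append(sorted_blocks[i:i + 1 + k])
--         i += 1 + k
--     return groups
-- ===== Notes on version B (the rewrite author's own statement) =====
-- stated objective: alternative
-- what changed: A's single accumulate-or-flush pass over the sorted list (mutable current_group flushed into groups) is replaced by a two-level decomposition: for each group start, a scan of adjacent pairs computes the chain length k, and the group is taken as one slice sorted_blocks[i:i+1+k], advancing i past it.
import Mathlib
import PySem

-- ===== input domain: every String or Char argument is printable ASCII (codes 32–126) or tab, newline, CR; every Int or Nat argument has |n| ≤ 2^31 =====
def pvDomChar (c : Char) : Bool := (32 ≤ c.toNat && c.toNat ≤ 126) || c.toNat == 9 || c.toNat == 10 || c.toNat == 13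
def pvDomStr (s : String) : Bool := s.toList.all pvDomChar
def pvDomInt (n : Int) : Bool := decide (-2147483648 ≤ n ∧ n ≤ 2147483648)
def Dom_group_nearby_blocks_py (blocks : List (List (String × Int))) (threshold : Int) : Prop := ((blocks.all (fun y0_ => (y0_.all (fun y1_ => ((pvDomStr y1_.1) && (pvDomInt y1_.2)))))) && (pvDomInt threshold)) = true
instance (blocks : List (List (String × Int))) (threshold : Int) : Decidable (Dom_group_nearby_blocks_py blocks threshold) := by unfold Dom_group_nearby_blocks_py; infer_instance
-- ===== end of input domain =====

-- B reorganises A's single accumulate-or-flush loop into a chain-length scan plus slicing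
-- (same cost, different decomposition); equivalence is about the return value only.


-- shared dict-lookup helpers: b['start'] / b['end'] on the association list.
-- Python raises KeyError when the key is missing; Pre_ excludes that, so the
-- `.getD 0` default is never reached on admitted inputs.
def pvGetKey (b : List (String × Int)) (k : String) : Option Int :=
  (PySem.Dict.ofList b).get? k

def pvStart (b : List (String × Int)) : Int := (pvGetKey b "start").getD 0
def pvEnd (b : List (String × Int)) : Int := (pvGetKey b "end").getD 0

-- ===== PORT A =====
-- literal transliteration: empty guard, stable sort by 'start', fold carrying
-- (groups, current_group), current_group[-1] via pyGet? (-1), final flush.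
def group_nearby_blocks_py (blocks : List (List (String × Int))) (threshold : Int) : List (List (List (String × Int))) :=
  if blocks = [] then []
  else
    match PySem.List.sorted blocks (fun b => pvStart b) with
    | [] => []   -- unreachable: sorted preserves length
    | first :: rest =>
      let st := rest.foldl
        (fun (acc : List (List (List (String × Int))) × List (List (String × Int))) block =>
          if pvStart block - pvEnd ((PySem.List.pyGet? acc.2 (-1)).getD []) ≤ threshold then
            (acc.1, acc.2 ++ [block])
          else
            (acc.1 ++ [acc.2], [block]))
        ([], [first])
      st.1 ++ [st.2]

-- ===== PORT B =====
-- chain_len(prev, rest): count of further blocks chaining within threshold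
def pvChainLen (threshold : Int) (prev : List (String × Int)) (rest : List (List (String × Int))) : Nat :=
  match rest with
  | [] => 0
  | b :: rs => if pvStart b - pvEnd prev > threshold then 0 else 1 + pvChainLen threshold b rs

-- the while-loop over the start index i, advancing by 1 + k and slicing each group off
def pvGroupRec (threshold : Int) (xs : List (List (String × Int))) : List (List (List (String × Int))) :=
  match xs with
  | [] => []
  | x :: rs =>
    let k := pvChainLen threshold x rs
    (x :: rs.take k) :: pvGroupRec threshold (rs.drop k)
  termination_by xs.length
  decreasing_by simp

def group_nearby_blocks_py_alt (blocks : List (List (String × Int))) (threshold : Int) : List (List (List (String × Int))) :=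
  pvGroupRec threshold (PySem.List.sorted blocks (fun b => pvStart b))

-- ===== PRECONDITION & SPEC =====
-- Pre_ admits exactly the inputs on which A returns (no KeyError): every block has a
-- 'start' key, and a block lacking 'end' must be the block the stable sort places last
-- (strictly greatest 'start', or greatest 'start' and after every tie) — the only
-- block whose 'end' A never reads.
def Pre_group_nearby_blocks_py (blocks : List (List (String × Int))) (threshold : Int) : Prop :=
  (∀ b ∈ blocks, (pvGetKey b "start").isSome = true) ∧
  (∀ i : Fin blocks.length, (pvGetKey (blocks.get i) "end").isSome = false →
     ∀ j : Fin blocks.length, j.1 ≠ i.1 →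
       pvStart (blocks.get j) < pvStart (blocks.get i) ∨
       (pvStart (blocks.get j) = pvStart (blocks.get i) ∧ j.1 < i.1))
instance (blocks : List (List (String × Int))) (threshold : Int) : Decidable (Pre_group_nearby_blocks_py blocks threshold) := by unfold Pre_group_nearby_blocks_py; infer_instance

def pvWitness_group_nearby_blocks_py : (List (List (String × Int))) × Int :=
  ([[("start", 0), ("end", 3)], [("start", 40), ("end", 45)], [("start", 5), ("end", 8)]], 16)

def Spec_group_nearby_blocks_py (blocks : List (List (String × Int))) (threshold : Int) (out : List (List (List (String × Int)))) : Prop := out = group_nearby_blocks_py_alt blocks threshold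
instance (blocks : List (List (String × Int))) (threshold : Int) (out : List (List (List (String × Int)))) : Decidable (Spec_group_nearby_blocks_py blocks threshold out) := by unfold Spec_group_nearby_blocks_py; infer_instance

-- ===== CLAIM (what is proved, stated in full; the proofs are below) =====
def Claim_equal_group_nearby_blocks_py : Prop := ∀ (blocks : List (List (String × Int))) (threshold : Int), Dom_group_nearby_blocks_py blocks threshold → Pre_group_nearby_blocks_py blocks threshold → Spec_group_nearby_blocks_py blocks threshold (group_nearby_blocks_py blocks threshold)

-- ===== LEMMAS AND PROOFS =====

-- equation lemmas for the well-founded recursion pvGroupRec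
lemma pvGroupRec_nil (t : Int) : pvGroupRec t [] = [] := by rw [pvGroupRec]

lemma pvGroupRec_cons (t : Int) (x : List (String × Int)) (rs : List (List (String × Int))) :
    pvGroupRec t (x :: rs) =
      (x :: rs.take (pvChainLen t x rs)) :: pvGroupRec t (rs.drop (pvChainLen t x rs)) := by
  rw [pvGroupRec]

-- A's fold from state (groups, cur) (cur nonempty, last element p) produces the
-- groups that B obtains by slicing chains off: the first group is cur completed
-- with the chain hanging off p, the remainder is pvGroupRec of what is left.
lemma pv_fold_eq_rec (t : Int) :
    ∀ (rest : List (List (String × Int)))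
      (groups : List (List (List (String × Int)))) (cur : List (List (String × Int)))
      (p : List (String × Int)), cur.getLast? = some p →
      (let st := rest.foldl
        (fun (acc : List (List (List (String × Int))) × List (List (String × Int))) block =>
          if pvStart block - pvEnd ((PySem.List.pyGet? acc.2 (-1)).getD []) ≤ t then
            (acc.1, acc.2 ++ [block])
          else
            (acc.1 ++ [acc.2], [block]))
        (groups, cur)
       st.1 ++ [st.2]) =
      groups ++ (cur ++ rest.take (pvChainLen t p rest))
        :: pvGroupRec t (rest.drop (pvChainLen t p rest)) := by
  intro rest
  induction rest with
  | nil =>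
    intro groups cur p hp
    simp [pvChainLen, pvGroupRec_nil]
  | cons b rs ih =>
    intro groups cur p hp
    have hlast : (PySem.List.pyGet? cur (-1)).getD ([] : List (String × Int)) = p := by
      rw [PySem.List.pyGet?_neg_one, hp]; rfl
    simp only [List.foldl_cons, hlast]
    by_cases hle : pvStart b - pvEnd p ≤ t
    · rw [if_pos hle]
      have hk : pvChainLen t p (b :: rs) = pvChainLen t b rs + 1 := by
        simp [pvChainLen, not_lt.mpr hle, Nat.add_comm]
      exact (ih groups (cur ++ [b]) b (by simp)).trans
        (by rw [hk]; simp [List.take_succ_cons, List.drop_succ_cons])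
    · rw [if_neg hle]
      have hk : pvChainLen t p (b :: rs) = 0 := by
        simp [pvChainLen, lt_of_not_ge hle]
      exact (ih (groups ++ [cur]) [b] b (by simp)).trans
        (by rw [hk]; simp [pvGroupRec_cons])

-- ===== VERDICT (by name: the statement is the Claim_ definition above) =====
theorem group_nearby_blocks_py_spec : Claim_equal_group_nearby_blocks_py := by
  intro blocks threshold _ _
  unfold Spec_group_nearby_blocks_py group_nearby_blocks_py group_nearby_blocks_py_alt
  by_cases hb : blocks = []
  · subst hb; simp [PySem.List.sorted, pvGroupRec_nil]
  · rw [if_neg hb]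
    have hlen : (PySem.List.sorted blocks (fun b => pvStart b)).length = blocks.length :=
      PySem.List.length_sorted ..
    cases hs : PySem.List.sorted blocks (fun b => pvStart b) with
    | nil =>
      exfalso
      rw [hs] at hlen
      exact hb (List.eq_nil_of_length_eq_zero hlen.symm)
    | cons first rest =>
      exact (pv_fold_eq_rec threshold rest [] [first] first (by simp)).trans
        (by rw [pvGroupRec_cons]; simp)
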